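-- pv_equiv track=rewrite | github.com/TLaborde/Aoc2023 | 2023_14.py | do_cycle
-- ===== SOURCE A (Python) =====
-- def m_transpose(matrix):
--     return [[matrix[i][j] for i in range(len(matrix))] for j in range(len(matrix[0]))]
--
-- def roll(data):
--     for row in data:
--         for i, cell in enumerate(row):
--             if cell == "#":
--                 continue
--             if cell == "O":
--                 j = i - 1
--                 while j >= 0 and row[j] == ".":
--                     row[j], row[j+1] = row[j+1], row[j]
--                     j -= 1
--     return data
--
-- def do_cycle(data):
--     north = m_transpose(data)
--     north = roll(north)
--     north = m_transpose(north)
--     west = roll(north)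
--     south = list(reversed(west))
--     south = m_transpose(south)
--     south = roll(south)
--     south = m_transpose(south)
--     south = list(reversed(south))
--     east = [list(reversed(r)) for r in south]
--     east = roll(east)
--     east = [list(reversed(r)) for r in east]
--     return east
-- ===== SOURCE B (Python) =====
-- def _cols(m, k):
--     return [[r[j] for r in m] for j in range(k)]
--
-- def _pack(nO, nD, front):
--     if front:
--         return ["O"] * nO + ["."] * nD
--     return ["."] * nD + ["O"] * nO
--
-- def _shift(line, front):
--     out = []
--     nO = 0
--     nD = 0
--     for c in line:
--         if c == "O":
--             nO += 1
--         elif c == ".":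
--             nD += 1
--         else:
--             out += _pack(nO, nD, front)
--             out.append(c)
--             nO = 0
--             nD = 0
--     out += _pack(nO, nD, front)
--     return out
--
-- def do_cycle(data):
--     w = len(data[0])
--     h = len(data)
--     g = [_shift(c, True) for c in _cols(data, w)]    # north: pack each column upward
--     g = [_shift(r, True) for r in _cols(g, h)]       # west: pack each row leftward
--     g = [_shift(c, False) for c in _cols(g, w)]      # south: pack each column downward
--     g = [_shift(r, False) for r in _cols(g, h)]      # east: pack each row rightward
--     return g
-- ===== Notes on version B (the rewrite author's own statement) =====
-- stated objective: simpler
-- what changed: Each of the four rolls now packs every row/column in a single counting pass (count rocks and gaps per blocker-delimited run and emit them packed) instead of bubble-swapping each rock cell-by-cell through the gaps, and the reverse/transpose plumbing is replaced by one column-extraction helper used for all four directions.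
import Mathlib
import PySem

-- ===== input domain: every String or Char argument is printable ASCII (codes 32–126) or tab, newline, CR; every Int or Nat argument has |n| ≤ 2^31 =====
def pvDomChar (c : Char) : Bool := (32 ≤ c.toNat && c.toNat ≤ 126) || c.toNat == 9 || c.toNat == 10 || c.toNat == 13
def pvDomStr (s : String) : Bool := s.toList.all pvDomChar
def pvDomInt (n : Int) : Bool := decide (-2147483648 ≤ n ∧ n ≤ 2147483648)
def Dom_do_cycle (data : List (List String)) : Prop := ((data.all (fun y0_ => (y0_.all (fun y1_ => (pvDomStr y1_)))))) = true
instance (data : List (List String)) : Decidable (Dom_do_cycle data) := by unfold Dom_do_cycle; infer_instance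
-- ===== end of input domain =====

-- B replaces A's per-cell bubble shift (and its transpose/reverse plumbing passes) by a
-- single-pass run-length packer per row/column, with one column-extraction helper for all four
-- directions: a simpler, structurally different algorithm. Return-value equivalence only;
-- neither program observably mutates the caller's list (A mutates only freshly built lists).

-- ===== PORT A =====
-- row[j], row[j+1] = row[j+1], row[j]
def pvSwap (r : List String) (k : Nat) : List String :=
  (r.set k (r.getD (k+1) "")).set (k+1) (r.getD k "")

-- the inner `while j >= 0 and row[j] == "."` loop; called with k = i means j = k-1
def pvWhile : List String → Nat → List String
  | r, 0 => r
  | r, k+1 => if r.getD k "" = "." then pvWhile (pvSwap r k) k else r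

-- the body of `for i, cell in enumerate(row)` (indices in range; getD is exact there)
def pvRollStep (r : List String) (i : Nat) : List String :=
  let cell := r.getD i ""
  if cell = "#" then r
  else if cell = "O" then pvWhile r i
  else r

def pvRollRow (row : List String) : List String :=
  (List.range row.length).foldl pvRollStep row

def pvRoll (data : List (List String)) : List (List String) := data.map pvRollRow

def pvTranspose (m : List (List String)) : List (List String) :=
  (List.range (m.getD 0 []).length).map (fun j =>
    (List.range m.length).map (fun i => (m.getD i []).getD j ""))

def do_cycle (data : List (List String)) : List (List String) :=
  let north := pvTranspose data
  let north := pvRoll north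
  let north := pvTranspose north
  let west := pvRoll north
  let south := west.reverse
  let south := pvTranspose south
  let south := pvRoll south
  let south := pvTranspose south
  let south := south.reverse
  let east := south.map List.reverse
  let east := pvRoll east
  east.map List.reverse

-- ===== PORT B =====
def pvCols (m : List (List String)) (k : Nat) : List (List String) :=
  (List.range k).map (fun j => m.map (fun r => r.getD j ""))

def pvPack (nO nD : Nat) (front : Bool) : List String :=
  if front then List.replicate nO "O" ++ List.replicate nD "."
  else List.replicate nD "." ++ List.replicate nO "O"

def pvShiftGo (front : Bool) : List String → Nat → Nat → List String
  | [], nO, nD => pvPack nO nD front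
  | c :: rest, nO, nD =>
    if c = "O" then pvShiftGo front rest (nO+1) nD
    else if c = "." then pvShiftGo front rest nO (nD+1)
    else pvPack nO nD front ++ c :: pvShiftGo front rest 0 0

def pvShift (line : List String) (front : Bool) : List String := pvShiftGo front line 0 0

def do_cycle_alt (data : List (List String)) : List (List String) :=
  let w := (data.getD 0 []).length
  let h := data.length
  let g := (pvCols data w).map (fun c => pvShift c true)
  let g := (pvCols g h).map (fun r => pvShift r true)
  let g := (pvCols g w).map (fun c => pvShift c false)
  (pvCols g h).map (fun r => pvShift r false)

-- ===== PRECONDITION & SPEC =====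
-- Exactly the inputs where the Python A returns normally: first row nonempty (else an empty
-- transpose is re-transposed and `matrix[0]` raises IndexError) and no row shorter than the
-- first (else `matrix[i][j]` raises IndexError in the first transpose).
def Pre_do_cycle (data : List (List String)) : Prop :=
  0 < (data.getD 0 []).length ∧ ∀ r ∈ data, (data.getD 0 []).length ≤ r.length
instance (data : List (List String)) : Decidable (Pre_do_cycle data) := by
  unfold Pre_do_cycle; infer_instance

def pvWitness_do_cycle : List (List String) := [["O", "."], ["#", "."]]

def Spec_do_cycle (data : List (List String)) (out : List (List String)) : Prop := out = do_cycle_alt data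
instance (data : List (List String)) (out : List (List String)) : Decidable (Spec_do_cycle data out) := by unfold Spec_do_cycle; infer_instance

-- ===== CLAIM (what is proved, stated in full; the proofs are below) =====
def Claim_equal_do_cycle : Prop := ∀ (data : List (List String)), Dom_do_cycle data → Pre_do_cycle data → Spec_do_cycle data (do_cycle data)

-- ===== LEMMAS AND PROOFS =====
set_option maxHeartbeats 1000000

theorem pvPack_length (a b : Nat) (f : Bool) : (pvPack a b f).length = a + b := by
  unfold pvPack; split <;> simp <;> try omega

theorem pvShiftGo_length (f : Bool) : ∀ (l : List String) (a b : Nat),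
    (pvShiftGo f l a b).length = a + b + l.length := by
  intro l
  induction l with
  | nil => intro a b; simp [pvShiftGo, pvPack_length]
  | cons c rest ih =>
    intro a b
    by_cases h1 : c = "O"
    · simp [pvShiftGo, h1, ih]; try omega
    · by_cases h2 : c = "."
      · simp [pvShiftGo, h2, ih]; try omega
      · simp [pvShiftGo, h1, h2, ih, pvPack_length]; try omega

theorem pvShift_length (l : List String) (f : Bool) : (pvShift l f).length = l.length := by
  simp [pvShift, pvShiftGo_length]

theorem range_map_getD {α β : Type} (l : List α) (d : α) (f : α → β) :
    (List.range l.length).map (fun i => f (l.getD i d)) = l.map f := by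
  induction l with
  | nil => simp
  | cons x xs ih =>
    simp only [List.length_cons, List.range_succ_eq_map, List.map_cons, List.map_map]
    refine congrArg₂ _ rfl ?_
    simpa [Function.comp] using ih

theorem getD_append_len {α : Type} (l : List α) (x : α) (tl : List α) (d : α) :
    (l ++ x :: tl).getD l.length d = x := by
  induction l with
  | nil => simp [List.getD]
  | cons y ys ih => simpa [List.getD] using ih

theorem getD_append_last {α : Type} (l : List α) (hl : l ≠ []) (tl : List α) (d d' : α) :
    (l ++ tl).getD (l.length - 1) d = l.getLastD d' := by
  obtain ⟨l', x, rfl⟩ := (List.eq_nil_or_concat l).resolve_left hl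
  simp only [List.concat_eq_append]
  have h1 : (l' ++ [x]) ++ tl = l' ++ x :: tl := by simp
  have h2 : (l' ++ [x]).length - 1 = l'.length := by simp
  rw [h1, h2, getD_append_len, List.getLastD_concat]

theorem replicate_snoc {α : Type} (n : Nat) (x : α) (l : List α) :
    List.replicate n x ++ x :: l = List.replicate (n+1) x ++ l := by
  rw [List.replicate_succ']; simp

theorem getLastD_append_replicate_succ (pre : List String) (n : Nat) (x d : String) :
    (pre ++ List.replicate (n+1) x).getLastD d = x := by
  rw [List.replicate_succ', ← List.append_assoc, List.getLastD_concat]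

theorem pvSwap_adj (a b : String) (tl : List String) :
    ∀ (l : List String), pvSwap (l ++ a :: b :: tl) l.length = l ++ b :: a :: tl := by
  intro l
  induction l with
  | nil => simp [pvSwap, List.getD]
  | cons x l ih =>
    simp only [List.cons_append, List.length_cons]
    simp only [pvSwap, List.getD_cons_succ, List.set_cons_succ] at ih ⊢
    rw [ih]

theorem pvWhile_bubble (base : List String) (hb : base.getLastD "#" ≠ ".") :
    ∀ (d : Nat) (tl : List String),
    pvWhile (base ++ (List.replicate d "." ++ ("O" :: tl))) (base.length + d)
      = base ++ ("O" :: (List.replicate d "." ++ tl)) := by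
  intro d
  induction d with
  | zero =>
    intro tl
    simp only [List.replicate, List.nil_append, Nat.add_zero]
    cases hlen : base.length with
    | zero =>
      have : base = [] := List.length_eq_zero_iff.mp hlen
      subst this; rfl
    | succ k =>
      have hne : base ≠ [] := by intro e; subst e; simp at hlen
      have hk : k = base.length - 1 := by omega
      simp only [pvWhile]
      rw [hk, getD_append_last base hne ("O" :: tl) "" "#", if_neg hb]
  | succ d ih =>
    intro tl
    have hidx : base.length + (d+1) = (base ++ List.replicate d ".").length + 1 := by
      simp; omega
    rw [hidx]
    simp only [pvWhile]
    have hsplit : base ++ (List.replicate (d+1) "." ++ ("O" :: tl))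
        = (base ++ List.replicate d ".") ++ "." :: "O" :: tl := by
      rw [List.replicate_succ']; simp
    rw [hsplit, getD_append_len, if_pos rfl, pvSwap_adj]
    have hre : (base ++ List.replicate d ".") ++ "O" :: "." :: tl
        = base ++ (List.replicate d "." ++ ("O" :: ("." :: tl))) := by simp
    have hidx2 : (base ++ List.replicate d ".").length = base.length + d := by simp
    rw [hre, hidx2, ih ("." :: tl), replicate_snoc]

theorem pvRollStep_eval (r : List String) (i : Nat) (c : String) (hc : r.getD i "" = c) :
    pvRollStep r i = if c = "#" then r else if c = "O" then pvWhile r i else r := by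
  have hc' : r[i]?.getD "" = c := by rw [← List.getD_eq_getElem?_getD]; exact hc
  simp only [pvRollStep, List.getD_eq_getElem?_getD, hc']

theorem roll_inv : ∀ (rest pre : List String) (n d : Nat),
    (pre ++ List.replicate n "O").getLastD "#" ≠ "." →
    (List.range' (pre.length + n + d) rest.length).foldl pvRollStep
      (pre ++ (List.replicate n "O" ++ (List.replicate d "." ++ rest)))
    = pre ++ pvShiftGo true rest n d := by
  intro rest
  induction rest with
  | nil =>
    intro pre n d _
    simp [pvShiftGo, pvPack]
  | cons c rest' ih =>
    intro pre n d hb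
    rw [List.length_cons, List.range'_succ, List.foldl_cons]
    have hPlen : (pre ++ List.replicate n "O" ++ List.replicate d ".").length
        = pre.length + n + d := by simp; omega
    have hcell : (pre ++ (List.replicate n "O" ++ (List.replicate d "." ++ (c :: rest')))).getD
        (pre.length + n + d) "" = c := by
      have hP : (pre ++ (List.replicate n "O" ++ (List.replicate d "." ++ (c :: rest'))))
          = (pre ++ List.replicate n "O" ++ List.replicate d ".") ++ c :: rest' := by simp
      rw [hP, ← hPlen, getD_append_len]
    rw [pvRollStep_eval _ _ c hcell]
    by_cases hO : c = "O"
    · -- bubble the rock left, then continue with n+1 rocks in the open run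
      subst hO
      rw [if_neg (by decide), if_pos rfl]
      have hb2 : (pre ++ List.replicate n "O").length + d = pre.length + n + d := by simp
      have hre : pre ++ (List.replicate n "O" ++ (List.replicate d "." ++ ("O" :: rest')))
          = (pre ++ List.replicate n "O") ++ (List.replicate d "." ++ ("O" :: rest')) := by simp
      rw [hre, ← hb2, pvWhile_bubble _ hb]
      have hre2 : (pre ++ List.replicate n "O") ++ ("O" :: (List.replicate d "." ++ rest'))
          = pre ++ (List.replicate (n+1) "O" ++ (List.replicate d "." ++ rest')) := by
        simp [List.replicate_succ']
      rw [hre2, hb2]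
      have hidx : pre.length + n + d + 1 = pre.length + (n+1) + d := by omega
      rw [hidx, ih pre (n+1) d (by rw [getLastD_append_replicate_succ]; decide)]
      simp [pvShiftGo]
    · by_cases hD : c = "."
      · subst hD
        rw [if_neg (by decide), if_neg (by decide)]
        have hre : pre ++ (List.replicate n "O" ++ (List.replicate d "." ++ ("." :: rest')))
            = pre ++ (List.replicate n "O" ++ (List.replicate (d+1) "." ++ rest')) := by
          simp [List.replicate_succ']
        rw [hre]
        have hidx : pre.length + n + d + 1 = pre.length + n + (d+1) := by omega
        rw [hidx, ih pre n (d+1) hb]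
        simp [pvShiftGo]
      · -- blocker: close the run
        have hstep : (if c = "#"
              then pre ++ (List.replicate n "O" ++ (List.replicate d "." ++ (c :: rest')))
              else if c = "O"
                then pvWhile (pre ++ (List.replicate n "O" ++ (List.replicate d "." ++ (c :: rest'))))
                  (pre.length + n + d)
                else pre ++ (List.replicate n "O" ++ (List.replicate d "." ++ (c :: rest'))))
            = pre ++ (List.replicate n "O" ++ (List.replicate d "." ++ (c :: rest'))) := by
          by_cases hH : c = "#"
          · rw [if_pos hH]
          · rw [if_neg hH, if_neg hO]
        rw [hstep]
        have hP2 : pre ++ (List.replicate n "O" ++ (List.replicate d "." ++ (c :: rest')))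
            = (pre ++ List.replicate n "O" ++ List.replicate d "." ++ [c])
              ++ (List.replicate 0 "O" ++ (List.replicate 0 "." ++ rest')) := by simp
        have hidx : pre.length + n + d + 1
            = (pre ++ List.replicate n "O" ++ List.replicate d "." ++ [c]).length + 0 + 0 := by
          simp; omega
        have hlast : ((pre ++ List.replicate n "O" ++ List.replicate d "." ++ [c])
            ++ List.replicate 0 "O").getLastD "#" ≠ "." := by
          have e : (pre ++ List.replicate n "O" ++ List.replicate d "." ++ [c])
              ++ List.replicate 0 "O"
              = (pre ++ List.replicate n "O" ++ List.replicate d ".") ++ [c] := by simp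
          rw [e, List.getLastD_concat]
          exact hD
        rw [hP2, hidx, ih _ 0 0 hlast]
        simp [pvShiftGo, hO, hD, pvPack]

theorem pvRollRow_eq_shift : pvRollRow = fun row => pvShift row true := by
  funext row
  have h := roll_inv row [] 0 0 (by decide)
  simpa [pvRollRow, pvShift, List.range_eq_range'] using h

theorem roll_eq (m : List (List String)) : pvRoll m = m.map (fun r => pvShift r true) := by
  simp [pvRoll, pvRollRow_eq_shift]

theorem shiftGo_consume_O (t : Bool) :
    ∀ (n : Nat) (xs : List String) (a b : Nat),
    pvShiftGo t (List.replicate n "O" ++ xs) a b = pvShiftGo t xs (a+n) b := by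
  intro n
  induction n with
  | zero => intro xs a b; simp
  | succ n ih =>
    intro xs a b
    rw [List.replicate_succ, List.cons_append]
    simp only [pvShiftGo, if_true]
    rw [ih, show a+1+n = a+(n+1) from by omega]

theorem shiftGo_consume_D (t : Bool) :
    ∀ (d : Nat) (xs : List String) (a b : Nat),
    pvShiftGo t (List.replicate d "." ++ xs) a b = pvShiftGo t xs a (b+d) := by
  intro d
  induction d with
  | zero => intro xs a b; simp
  | succ d ih =>
    intro xs a b
    rw [List.replicate_succ, List.cons_append]
    simp only [pvShiftGo, if_true]
    rw [if_neg (by decide : ¬("." = "O")), ih, show b+1+d = b+(d+1) from by omega]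

theorem shiftGo_comm_dot (t : Bool) (n : Nat) (ys : List String) :
    ∀ (xs : List String) (a b : Nat),
    pvShiftGo t (xs ++ "." :: (List.replicate n "O" ++ ys)) a b
      = pvShiftGo t (xs ++ (List.replicate n "O" ++ "." :: ys)) a b := by
  intro xs
  induction xs with
  | nil =>
    intro a b
    simp only [List.nil_append]
    have e1 : pvShiftGo t ("." :: (List.replicate n "O" ++ ys)) a b
        = pvShiftGo t (List.replicate n "O" ++ ys) a (b+1) := by
      simp only [pvShiftGo, if_true]
      rw [if_neg (by decide : ¬("." = "O"))]
    have e2 : pvShiftGo t ("." :: ys) (a+n) b = pvShiftGo t ys (a+n) (b+1) := by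
      simp only [pvShiftGo, if_true]
      rw [if_neg (by decide : ¬("." = "O"))]
    rw [e1, shiftGo_consume_O, shiftGo_consume_O, e2]
  | cons x xs ih =>
    intro a b
    by_cases h1 : x = "O"
    · simp [pvShiftGo, h1, ih]
    · by_cases h2 : x = "."
      · simp [pvShiftGo, h2, ih]
      · simp [pvShiftGo, h1, h2, ih]

theorem shiftGo_split_blocker (t : Bool) (c : String) (hO : c ≠ "O") (hD : c ≠ ".")
    (ys : List String) : ∀ (xs : List String) (a b : Nat),
    pvShiftGo t (xs ++ c :: ys) a b = pvShiftGo t xs a b ++ c :: pvShiftGo t ys 0 0 := by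
  intro xs
  induction xs with
  | nil => intro a b; simp [pvShiftGo, hO, hD]
  | cons x xs ih =>
    intro a b
    by_cases h1 : x = "O"
    · simp [pvShiftGo, h1, ih]
    · by_cases h2 : x = "."
      · simp [pvShiftGo, h2, ih]
      · simp [pvShiftGo, h1, h2, ih]

theorem pack_reverse (n d : Nat) : (pvPack n d true).reverse = pvPack n d false := by
  simp [pvPack]

theorem shift_rev (l : List String) :
    ∀ (n d : Nat),
    (pvShiftGo true (l.reverse ++ (List.replicate n "O" ++ List.replicate d ".")) 0 0).reverse
      = pvShiftGo false l n d := by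
  induction l with
  | nil =>
    intro n d
    simp only [List.reverse_nil, List.nil_append]
    rw [shiftGo_consume_O]
    conv_lhs => rw [← List.append_nil (List.replicate d ".")]
    rw [shiftGo_consume_D]
    simp [pvShiftGo, pack_reverse]
  | cons c l' ih =>
    intro n d
    by_cases hO : c = "O"
    · subst hO
      have hre : ("O" :: l').reverse ++ (List.replicate n "O" ++ List.replicate d ".")
          = l'.reverse ++ (List.replicate (n+1) "O" ++ List.replicate d ".") := by
        simp [List.replicate_succ]
      rw [hre, ih (n+1) d]
      simp [pvShiftGo]
    · by_cases hD : c = "."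
      · subst hD
        have hre : ("." :: l').reverse ++ (List.replicate n "O" ++ List.replicate d ".")
            = l'.reverse ++ "." :: (List.replicate n "O" ++ List.replicate d ".") := by
          simp
        rw [hre, shiftGo_comm_dot]
        have hre2 : l'.reverse ++ (List.replicate n "O" ++ "." :: List.replicate d ".")
            = l'.reverse ++ (List.replicate n "O" ++ List.replicate (d+1) ".") := by
          rw [List.replicate_succ]
        rw [hre2, ih n (d+1)]
        simp [pvShiftGo]
      · have hre : (c :: l').reverse ++ (List.replicate n "O" ++ List.replicate d ".")
            = l'.reverse ++ c :: (List.replicate n "O" ++ List.replicate d ".") := by simp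
        rw [hre, shiftGo_split_blocker true c hO hD, shiftGo_consume_O]
        conv_lhs => rw [← List.append_nil (List.replicate d ".")]
        rw [shiftGo_consume_D]
        have ih0 := ih 0 0
        simp only [List.replicate_zero, List.append_nil] at ih0
        simp [pvShiftGo, hO, hD, List.reverse_append, pack_reverse, ih0]

theorem shift_reverse_false (l : List String) :
    (pvShift l.reverse true).reverse = pvShift l false := by
  have h := shift_rev l 0 0
  simpa [pvShift] using h

theorem shift_reverse_false' (l : List String) :
    pvShift l.reverse true = (pvShift l false).reverse := by
  rw [← shift_reverse_false]; simp

-- geometry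
def pvRect (m : List (List String)) (c : Nat) : Prop := ∀ r ∈ m, r.length = c

theorem transpose_eq_cols (m : List (List String)) :
    pvTranspose m = pvCols m (m.getD 0 []).length := by
  unfold pvTranspose pvCols
  refine List.map_congr_left ?_
  intro j _
  exact range_map_getD m [] (fun r => r.getD j "")

theorem cols_length (m : List (List String)) (k : Nat) : (pvCols m k).length = k := by
  simp [pvCols]

theorem cols_rect (m : List (List String)) (k : Nat) : pvRect (pvCols m k) m.length := by
  intro r hr
  simp only [pvCols, List.mem_map, List.mem_range] at hr
  obtain ⟨j, _, rfl⟩ := hr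
  simp

theorem rect_map_shift (m : List (List String)) (c : Nat) (f : Bool) (h : pvRect m c) :
    pvRect (m.map (fun r => pvShift r f)) c := by
  intro r hr
  simp only [List.mem_map] at hr
  obtain ⟨r', hr', rfl⟩ := hr
  rw [pvShift_length]
  exact h r' hr'

theorem rect_reverse (m : List (List String)) (c : Nat) (h : pvRect m c) :
    pvRect m.reverse c := by
  intro r hr
  exact h r (List.mem_reverse.mp hr)

theorem rect_map_reverse (m : List (List String)) (c : Nat) (h : pvRect m c) :
    pvRect (m.map List.reverse) c := by
  intro r hr
  simp only [List.mem_map] at hr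
  obtain ⟨r', hr', rfl⟩ := hr
  simpa using h r' hr'

theorem rect_getD0 (m : List (List String)) (c : Nat) (h : pvRect m c) (hm : m ≠ []) :
    (m.getD 0 []).length = c := by
  cases m with
  | nil => exact absurd rfl hm
  | cons x xs => exact h x (by simp)

theorem getD_reverse {α : Type} (l : List α) (i : Nat) (h : i < l.length) (d : α) :
    l.reverse.getD i d = l.getD (l.length - 1 - i) d := by
  have h' : i < l.reverse.length := by simpa using h
  rw [List.getD_eq_getElem?_getD, List.getElem?_eq_getElem h',
      List.getD_eq_getElem?_getD, List.getElem?_eq_getElem (by omega)]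
  simp [List.getElem_reverse]

theorem map_range_reverse {β : Type} (F : Nat → β) (c : Nat) :
    ((List.range c).map F).reverse = (List.range c).map (fun j => F (c-1-j)) := by
  rw [← List.map_reverse]
  conv_lhs => rw [List.range_eq_range', List.reverse_range']
  rw [List.map_map]
  simp [Function.comp]

theorem cols_reverse (m : List (List String)) (k : Nat) :
    pvCols m.reverse k = (pvCols m k).map List.reverse := by
  simp [pvCols, List.map_map, Function.comp, List.map_reverse]

theorem cols_map_reverse (m : List (List String)) (c : Nat) (h : pvRect m c) :
    pvCols (m.map List.reverse) c = (pvCols m c).reverse := by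
  unfold pvCols
  rw [map_range_reverse (fun j => m.map (fun r => r.getD j "")) c]
  refine List.map_congr_left ?_
  intro j hj
  rw [List.mem_range] at hj
  rw [List.map_map]
  refine List.map_congr_left ?_
  intro r hr
  have hlen := h r hr
  simp only [Function.comp]
  rw [getD_reverse r j (by omega) "", hlen]

-- ===== VERDICT (by name: the statement is the Claim_ definition above) =====
theorem do_cycle_spec : Claim_equal_do_cycle := by
  intro data _dom hpre
  obtain ⟨hw, _hr⟩ := hpre
  unfold Spec_do_cycle
  show do_cycle data = do_cycle_alt data
  simp only [do_cycle, do_cycle_alt]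
  have hdne : data ≠ [] := by
    intro e; subst e; simp at hw
  have hh : 0 < data.length := List.length_pos_iff.mpr hdne
  set w := (data.getD 0 []).length with hwdef
  set h := data.length with hhdef
  rw [transpose_eq_cols data, ← hwdef, roll_eq (pvCols data w)]
  set G2 := (pvCols data w).map (fun r => pvShift r true) with hG2
  have hG2len : G2.length = w := by rw [hG2, List.length_map, cols_length]
  have hG2rect : pvRect G2 h := rect_map_shift _ _ _ (cols_rect data w)
  have hG2ne : G2 ≠ [] := by
    intro e
    rw [e] at hG2len
    simp at hG2len
    omega
  rw [transpose_eq_cols G2, rect_getD0 G2 h hG2rect hG2ne, roll_eq (pvCols G2 h)]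
  set R2 := (pvCols G2 h).map (fun r => pvShift r true) with hR2
  have hR2len : R2.length = h := by rw [hR2, List.length_map, cols_length]
  have hR2rect : pvRect R2 w := by
    have hcr := cols_rect G2 h
    rw [hG2len] at hcr
    exact rect_map_shift _ _ _ hcr
  have hR2revne : R2.reverse ≠ [] := by
    intro e
    have : R2 = [] := by simpa using e
    rw [this] at hR2len
    simp at hR2len
    omega
  rw [transpose_eq_cols R2.reverse, rect_getD0 R2.reverse w (rect_reverse _ _ hR2rect) hR2revne,
      cols_reverse R2 w, roll_eq ((pvCols R2 w).map List.reverse)]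
  have hswap : ((pvCols R2 w).map List.reverse).map (fun r => pvShift r true)
      = ((pvCols R2 w).map (fun c => pvShift c false)).map List.reverse := by
    simp only [List.map_map]
    refine List.map_congr_left ?_
    intro c _
    simp only [Function.comp]
    exact shift_reverse_false' c
  rw [hswap]
  set C2 := (pvCols R2 w).map (fun c => pvShift c false) with hC2
  have hC2len : C2.length = w := by rw [hC2, List.length_map, cols_length]
  have hC2rect : pvRect C2 h := by
    have hcr := cols_rect R2 w
    rw [hR2len] at hcr
    exact rect_map_shift _ _ _ hcr
  have hC2mapne : C2.map List.reverse ≠ [] := by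
    intro e
    have : C2 = [] := by simpa using e
    rw [this] at hC2len
    simp at hC2len
    omega
  rw [transpose_eq_cols (C2.map List.reverse),
      rect_getD0 (C2.map List.reverse) h (rect_map_reverse _ _ hC2rect) hC2mapne,
      cols_map_reverse C2 h hC2rect, List.reverse_reverse,
      roll_eq ((pvCols C2 h).map List.reverse)]
  simp only [List.map_map]
  refine List.map_congr_left ?_
  intro r _
  simp only [Function.comp]
  exact shift_reverse_false r
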